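-- pv_equiv track=rewrite | github.com/SW9-Cryptanalysis/Bayesian-Inference | src/lm_models/incremental_scorer.py | find_affected_positions_in_plaintext
-- ===== SOURCE A (Python) =====
-- from typing import List, Tuple, Set, Optional
--
-- def find_affected_positions_in_plaintext(ciphertext: List[int], changed_symbol: int,
--                                          space_positions: Set[int]) -> List[int]:
--     """Find all positions in plaintext affected by changing a cipher symbol.
--
--     When we change the mapping for a cipher symbol, all occurrences of that
--     symbol in the ciphertext are affected.
--
--     Args:
--         ciphertext: The ciphertext symbols
--         changed_symbol: The cipher symbol whose mapping changed
--         space_positions: Current space positions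
--
--     Returns:
--         List[int]: Sorted indices in the plaintext (with spaces) that are affected
--     """
--     affected = []
--
--     # Find all positions of this symbol in ciphertext
--     for cipher_idx, symbol in enumerate(ciphertext):
--         if symbol == changed_symbol:
--             # Convert cipher index to plaintext index (accounting for spaces)
--             plain_idx = cipher_idx
--             for space_pos in sorted(space_positions):
--                 if space_pos <= cipher_idx:
--                     plain_idx += 1
--                 else:
--                     break
--             affected.append(plain_idx)
--
--     return sorted(affected)
-- ===== SOURCE B (Python) =====
-- from bisect import bisect_right
-- from typing import List, Set
--
--
-- def find_affected_positions_in_plaintext(ciphertext: List[int], changed_symbol: int,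
--                                          space_positions: Set[int]) -> List[int]:
--     """Locate the occurrences of the symbol with list.index, then shift each by
--     the number of spaces at or before it (one sort + bisect_right, skipped when
--     the symbol does not occur). Occurrences come left to right and the shift is
--     monotone, so the result is already sorted."""
--     occurrences = []
--     start = 0
--     while True:
--         try:
--             idx = ciphertext.index(changed_symbol, start)
--         except ValueError:
--             break
--         occurrences.append(idx)
--         start = idx + 1
--     if not occurrences:
--         return []
--     sorted_spaces = sorted(space_positions)
--     return [idx + bisect_right(sorted_spaces, idx) for idx in occurrences]
-- ===== Notes on version B (the rewrite author's own statement) =====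
-- stated objective: alternative
-- what changed: B locates the occurrences of the symbol with list.index instead of testing every position in a Python loop, sorts space_positions once (only when the symbol occurs) and shifts each occurrence with bisect_right instead of re-sorting and linearly scanning the spaces per occurrence, and emits the results directly (provably already sorted) instead of sorting at the end.
import Mathlib
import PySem

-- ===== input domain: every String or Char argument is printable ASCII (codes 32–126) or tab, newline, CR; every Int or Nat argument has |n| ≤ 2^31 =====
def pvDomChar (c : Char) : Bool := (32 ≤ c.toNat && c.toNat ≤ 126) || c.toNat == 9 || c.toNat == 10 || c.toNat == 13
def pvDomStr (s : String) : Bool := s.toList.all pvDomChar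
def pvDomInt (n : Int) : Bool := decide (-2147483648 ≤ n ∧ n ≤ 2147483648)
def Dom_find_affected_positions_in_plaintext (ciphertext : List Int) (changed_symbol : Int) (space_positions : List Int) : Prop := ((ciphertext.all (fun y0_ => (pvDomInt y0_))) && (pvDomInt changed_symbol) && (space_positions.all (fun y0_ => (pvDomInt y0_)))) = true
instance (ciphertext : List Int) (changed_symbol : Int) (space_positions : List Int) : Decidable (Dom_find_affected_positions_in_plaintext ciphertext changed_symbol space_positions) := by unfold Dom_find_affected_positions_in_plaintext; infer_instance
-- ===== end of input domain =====

-- ===== PORT A =====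
-- B locates occurrences with list.index and shifts them via one sort plus bisect_right,
-- instead of A's per-occurrence sort-and-scan of the spaces and final sort.
-- inner loop of A: 'for space_pos in sorted(space_positions): if space_pos <= cipher_idx: plain_idx += 1 else: break'
def pvScanSpaces (cipher_idx : Int) (plain_idx : Int) : List Int → Int
  | [] => plain_idx
  | space_pos :: rest =>
      if space_pos ≤ cipher_idx then pvScanSpaces cipher_idx (plain_idx + 1) rest else plain_idx

def find_affected_positions_in_plaintext (ciphertext : List Int) (changed_symbol : Int) (space_positions : List Int) : List Int :=
  PySem.List.sorted
    ((PySem.List.enumerate ciphertext).foldl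
      (fun affected p =>
        if p.2 == changed_symbol then
          affected ++ [pvScanSpaces p.1 p.1 (PySem.List.sorted space_positions (fun x => x))]
        else affected)
      [])
    (fun x => x)

-- ===== PORT B =====
-- 'ciphertext.index(changed_symbol, start)' is ported by hand as index? on the dropped
-- prefix plus the offset: exact for the non-negative start values this loop produces.
def pvFindOccurrences (ciphertext : List Int) (changed_symbol : Int)
    (occurrences : List Int) (start : Nat) : List Int :=
  match h : PySem.List.index? (ciphertext.drop start) changed_symbol with
  | none => occurrences
  | some k =>
      pvFindOccurrences ciphertext changed_symbol
        (occurrences ++ [((start + k : Nat) : Int)]) (start + k + 1)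
termination_by ciphertext.length - start
decreasing_by
  obtain ⟨pre, suf, hsplit, hlen, -⟩ := (PySem.List.index?_eq_some_iff _ _ _).mp h
  have hk : k < (ciphertext.drop start).length := by rw [hsplit]; simp; omega
  simp at hk; omega

def find_affected_positions_in_plaintext_alt (ciphertext : List Int) (changed_symbol : Int) (space_positions : List Int) : List Int :=
  let occurrences := pvFindOccurrences ciphertext changed_symbol [] 0
  if occurrences = [] then []
  else
    let sorted_spaces := PySem.List.sorted space_positions (fun x => x)
    occurrences.map (fun idx => idx + ((PySem.List.bisectRight sorted_spaces idx : Nat) : Int))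

-- ===== PRECONDITION & SPEC =====
def Spec_find_affected_positions_in_plaintext (ciphertext : List Int) (changed_symbol : Int) (space_positions : List Int) (out : List Int) : Prop := out = find_affected_positions_in_plaintext_alt ciphertext changed_symbol space_positions
instance (ciphertext : List Int) (changed_symbol : Int) (space_positions : List Int) (out : List Int) : Decidable (Spec_find_affected_positions_in_plaintext ciphertext changed_symbol space_positions out) := by unfold Spec_find_affected_positions_in_plaintext; infer_instance

-- ===== CLAIM (what is proved, stated in full; the proofs are below) =====
def Claim_equal_find_affected_positions_in_plaintext : Prop := ∀ (ciphertext : List Int) (changed_symbol : Int) (space_positions : List Int), Dom_find_affected_positions_in_plaintext ciphertext changed_symbol space_positions → Spec_find_affected_positions_in_plaintext ciphertext changed_symbol space_positions (find_affected_positions_in_plaintext ciphertext changed_symbol space_positions)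

-- ===== LEMMAS AND PROOFS =====

theorem pvFindOccurrences_eq (ct : List Int) (cs : Int) (start : Nat) (acc : List Int) :
    pvFindOccurrences ct cs acc start =
      acc ++ ((PySem.List.enumerate (ct.drop start) (start : Int)).filter (fun p => p.2 == cs)).map
        (fun p => p.1) := by
  rw [pvFindOccurrences]
  split
  next h =>
    have hnotin := (PySem.List.index?_eq_none_iff _ _).mp h
    have : ((PySem.List.enumerate (ct.drop start) (start : Int)).filter (fun p => p.2 == cs)) = [] := by
      rw [List.filter_eq_nil_iff]
      intro p hp
      have hmem : p.2 ∈ ct.drop start := by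
        rw [← PySem.List.map_snd_enumerate (ct.drop start) (start : Int)]
        exact List.mem_map_of_mem hp
      simp only [beq_iff_eq]
      intro hq; exact hnotin (hq ▸ hmem)
    rw [this]; simp
  next k h =>
    obtain ⟨pre, suf, hsplit, hlen, hnotin⟩ := (PySem.List.index?_eq_some_iff _ _ _).mp h
    have hsuf : ct.drop (start + k + 1) = suf := by
      have h1 : (ct.drop start).drop (k + 1) = suf := by
        rw [hsplit, show pre ++ cs :: suf = (pre ++ [cs]) ++ suf by simp,
          show k + 1 = (pre ++ [cs]).length by simp [hlen]]
        exact List.drop_left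
      rw [List.drop_drop] at h1
      rw [show start + k + 1 = start + (k + 1) by omega]
      exact h1
    have hprefilter :
        ((PySem.List.enumerate pre (start : Int)).filter (fun p => p.2 == cs)) = [] := by
      rw [List.filter_eq_nil_iff]
      intro p hp
      have hmem : p.2 ∈ pre := by
        rw [← PySem.List.map_snd_enumerate pre (start : Int)]
        exact List.mem_map_of_mem hp
      simp only [beq_iff_eq]
      intro hq; exact hnotin (hq ▸ hmem)
    have hklen : start + k < ct.length := by
      have hk : k < (ct.drop start).length := by rw [hsplit]; simp; omega
      simp at hk; omega
    rw [pvFindOccurrences_eq ct cs (start + k + 1) _, hsuf, hsplit,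
      PySem.List.enumerate_append, PySem.List.enumerate_cons, hlen,
      List.filter_append, hprefilter, List.nil_append]
    simp only [List.filter_cons, beq_self_eq_true, if_pos, List.map_cons, List.append_assoc,
      List.cons_append, List.nil_append]
    push_cast
    ring_nf
termination_by ct.length - start
decreasing_by omega

theorem pvScanSpaces_eq_count (cipher_idx : Int) :
    ∀ (l : List Int) (acc : Int), l.Pairwise (· ≤ ·) →
      pvScanSpaces cipher_idx acc l = acc + (l.countP (fun x => decide (x ≤ cipher_idx)) : Int)
  | [], acc, _ => by simp [pvScanSpaces]
  | a :: t, acc, h => by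
      rcases List.pairwise_cons.mp h with ⟨hall, ht⟩
      by_cases hai : a ≤ cipher_idx
      · rw [pvScanSpaces, if_pos hai, pvScanSpaces_eq_count cipher_idx t (acc + 1) ht,
          List.countP_cons_of_pos (by simpa using hai)]
        push_cast; ring
      · rw [pvScanSpaces, if_neg hai]
        have : (a :: t).countP (fun x => decide (x ≤ cipher_idx)) = 0 := by
          rw [List.countP_eq_zero]
          intro x hx
          rcases List.mem_cons.mp hx with rfl | hx
          · simpa using hai
          · have := hall x hx; simp; omega
        rw [this]; simp

theorem bisectRight_eq_count (l : List Int) (h : l.Pairwise (· ≤ ·)) (i : Int) :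
    PySem.List.bisectRight l i = l.countP (fun x => decide (x ≤ i)) := by
  obtain ⟨hk, hlt, hge⟩ := PySem.List.bisectRight_spec l i h
  set k := PySem.List.bisectRight l i with hkdef
  have hsplit : l.countP (fun x => decide (x ≤ i)) =
      (l.take k).countP (fun x => decide (x ≤ i)) + (l.drop k).countP (fun x => decide (x ≤ i)) := by
    conv_lhs => rw [← List.take_append_drop k l]
    rw [List.countP_append]
  have h1 : (l.take k).countP (fun x => decide (x ≤ i)) = (l.take k).length := by
    rw [List.countP_eq_length]
    intro x hx
    obtain ⟨j, hj, hx⟩ := List.getElem_of_mem hx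
    have hj' : j < k ∧ j < l.length := by simpa using hj
    have := hlt j hj'.2 hj'.1
    simp [List.getElem_take] at hx
    simp [← hx]; omega
  have h2 : (l.drop k).countP (fun x => decide (x ≤ i)) = 0 := by
    rw [List.countP_eq_zero]
    intro x hx
    obtain ⟨j, hj, hx⟩ := List.getElem_of_mem hx
    have hj' : j < l.length - k := by simpa using hj
    have := hge (k + j) (by omega) (Nat.le_add_right _ _)
    simp [List.getElem_drop] at hx
    simp [← hx]; omega
  have hlen : (l.take k).length = k := by simp; omega
  omega

theorem enumerate_fst_lb (xs : List Int) : ∀ (s : Int), ∀ p ∈ PySem.List.enumerate xs s, s ≤ p.1 := by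
  induction xs with
  | nil => intro s p hp; simp [PySem.List.enumerate_nil] at hp
  | cons x t ih =>
      intro s p hp
      rw [PySem.List.enumerate_cons] at hp
      rcases List.mem_cons.mp hp with rfl | hp
      · simp
      · have := ih (s + 1) p hp; omega

theorem enumerate_pairwise_fst (xs : List Int) : ∀ (s : Int),
    (PySem.List.enumerate xs s).Pairwise (fun p q => p.1 < q.1) := by
  induction xs with
  | nil => intro s; simp [PySem.List.enumerate_nil]
  | cons x t ih =>
      intro s
      rw [PySem.List.enumerate_cons, List.pairwise_cons]
      exact ⟨fun q hq => by have := enumerate_fst_lb t (s + 1) q hq; simp; omega, ih (s + 1)⟩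

-- ===== VERDICT (by name: the statement is the Claim_ definition above) =====
theorem find_affected_positions_in_plaintext_spec : Claim_equal_find_affected_positions_in_plaintext := by
  intro ciphertext changed_symbol space_positions _
  unfold Spec_find_affected_positions_in_plaintext
  unfold find_affected_positions_in_plaintext find_affected_positions_in_plaintext_alt
  have hsorted : (PySem.List.sorted space_positions (fun x => x)).Pairwise (· ≤ ·) := by
    simpa using PySem.List.sorted_pairwise space_positions (fun x => x)
  set sp' := PySem.List.sorted space_positions (fun x => x) with hsp
  rw [PySem.List.foldl_append_if (fun p : Int × Int => p.2 == changed_symbol)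
        (fun p => pvScanSpaces p.1 p.1 sp') (PySem.List.enumerate ciphertext) [],
      pvFindOccurrences_eq ciphertext changed_symbol 0 []]
  simp only [List.nil_append, List.drop_zero, Nat.cast_zero]
  have hval : ∀ i : Int, pvScanSpaces i i sp' = i + ((PySem.List.bisectRight sp' i : Nat) : Int) := by
    intro i
    rw [pvScanSpaces_eq_count i sp' i hsorted, bisectRight_eq_count sp' hsorted i]
  have hmapeq :
      ((PySem.List.enumerate ciphertext).filter (fun p => p.2 == changed_symbol)).map
          (fun p => pvScanSpaces p.1 p.1 sp') =
      (((PySem.List.enumerate ciphertext).filter (fun p => p.2 == changed_symbol)).map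
          (fun p => p.1)).map
          (fun idx => idx + ((PySem.List.bisectRight sp' idx : Nat) : Int)) := by
    rw [List.map_map]
    exact List.map_congr_left (fun p _ => hval p.1)
  split
  next hnil =>
    rw [List.map_eq_nil_iff.mp hnil]
    simp [PySem.List.sorted]
  next hnil =>
    rw [hmapeq]
    apply PySem.List.sorted_eq_self_of_pairwise
    rw [List.pairwise_map, List.pairwise_map]
    have hpf : ((PySem.List.enumerate ciphertext).filter (fun p => p.2 == changed_symbol)).Pairwise
        (fun p q => p.1 < q.1) :=
      (enumerate_pairwise_fst ciphertext 0).sublist List.filter_sublist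
    refine hpf.imp ?_
    intro a b hab
    have hcnt : sp'.countP (fun x => decide (x ≤ a.1)) ≤ sp'.countP (fun x => decide (x ≤ b.1)) :=
      List.countP_mono_left (by intro x _ hx; simp at hx ⊢; omega)
    have ha := bisectRight_eq_count sp' hsorted a.1
    have hb := bisectRight_eq_count sp' hsorted b.1
    omega
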